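-- pv_equiv track=rewrite | github.com/vporubsky/CaGraph | scratch_files/highlight_context_active_nodes.py | get_context_active_indices
-- ===== SOURCE A (Python) =====
-- def get_context_active_indices(con_act):
--     nonspecific_indices = []
--     con_A_active_indices = []
--     con_B_active_indices = []
--     for i in range(len(con_act)):
--         if con_act[i] == 0:
--             nonspecific_indices.append(i)
--         elif con_act[i] == 1:
--             con_A_active_indices.append(i)
--         elif con_act[i] == 2:
--             con_B_active_indices.append(i)
--     return nonspecific_indices, con_A_active_indices, con_B_active_indices
-- ===== SOURCE B (Python) =====
-- def get_context_active_indices(con_act):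
--     pairs = list(enumerate(con_act))
--     return ([i for i, v in pairs if v == 0],
--             [i for i, v in pairs if v == 1],
--             [i for i, v in pairs if v == 2])
-- ===== Notes on version B (the rewrite author's own statement) =====
-- stated objective: idiomatic
-- what changed: Replaces the single indexed loop with an if/elif chain mutating three accumulators by three independent filtering comprehensions over enumerate(con_act).
import Mathlib
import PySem

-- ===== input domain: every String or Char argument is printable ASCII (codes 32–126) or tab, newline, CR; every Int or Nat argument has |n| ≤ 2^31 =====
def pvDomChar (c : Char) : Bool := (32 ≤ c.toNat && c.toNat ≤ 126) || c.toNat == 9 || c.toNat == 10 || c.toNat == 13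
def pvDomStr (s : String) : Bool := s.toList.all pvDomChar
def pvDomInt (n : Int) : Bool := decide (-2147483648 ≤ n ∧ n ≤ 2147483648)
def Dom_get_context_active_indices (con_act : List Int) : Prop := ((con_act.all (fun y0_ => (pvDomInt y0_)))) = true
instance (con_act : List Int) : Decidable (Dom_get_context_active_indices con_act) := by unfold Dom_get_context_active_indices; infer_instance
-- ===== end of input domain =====

-- B replaces A's single indexed loop with an if/elif chain by three independent
-- filtering comprehensions over enumerate (idiomatic; same O(n) cost).

-- ===== PORT A =====
def get_context_active_indices (con_act : List Int) : List Int × List Int × List Int :=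
  (PySem.List.pyRange 0 con_act.length 1).foldl
    (fun (acc : List Int × List Int × List Int) i =>
      if PySem.List.pyGetD con_act i 0 = 0 then (acc.1 ++ [i], acc.2.1, acc.2.2)
      else if PySem.List.pyGetD con_act i 0 = 1 then (acc.1, acc.2.1 ++ [i], acc.2.2)
      else if PySem.List.pyGetD con_act i 0 = 2 then (acc.1, acc.2.1, acc.2.2 ++ [i])
      else acc)
    ([], [], [])

-- ===== PORT B =====
def get_context_active_indices_alt (con_act : List Int) : List Int × List Int × List Int :=
  let pairs := PySem.List.enumerate con_act 0
  ((pairs.filter (fun p => p.2 == 0)).map (·.1),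
   (pairs.filter (fun p => p.2 == 1)).map (·.1),
   (pairs.filter (fun p => p.2 == 2)).map (·.1))

-- ===== PRECONDITION & SPEC =====
def Spec_get_context_active_indices (con_act : List Int) (out : List Int × List Int × List Int) : Prop := out = get_context_active_indices_alt con_act
instance (con_act : List Int) (out : List Int × List Int × List Int) : Decidable (Spec_get_context_active_indices con_act out) := by unfold Spec_get_context_active_indices; infer_instance

-- ===== CLAIM (what is proved, stated in full; the proofs are below) =====
def Claim_equal_get_context_active_indices : Prop := ∀ (con_act : List Int), Dom_get_context_active_indices con_act → Spec_get_context_active_indices con_act (get_context_active_indices con_act)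

-- ===== LEMMAS AND PROOFS =====

-- A's fold over (index, value) pairs splits into three independent filters.
theorem pvTriFold (l : List (Int × Int)) (a b c : List Int) :
    l.foldl
      (fun (acc : List Int × List Int × List Int) (p : Int × Int) =>
        if p.2 = 0 then (acc.1 ++ [p.1], acc.2.1, acc.2.2)
        else if p.2 = 1 then (acc.1, acc.2.1 ++ [p.1], acc.2.2)
        else if p.2 = 2 then (acc.1, acc.2.1, acc.2.2 ++ [p.1])
        else acc)
      (a, b, c)
    = (a ++ (l.filter (fun p => p.2 == 0)).map (·.1),
       b ++ (l.filter (fun p => p.2 == 1)).map (·.1),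
       c ++ (l.filter (fun p => p.2 == 2)).map (·.1)) := by
  induction l generalizing a b c with
  | nil => simp
  | cons p t ih =>
    simp only [List.foldl_cons, List.filter_cons]
    by_cases h0 : p.2 = 0
    · simp [h0, ih]
    · by_cases h1 : p.2 = 1
      · simp [h0, h1, ih]
      · by_cases h2 : p.2 = 2
        · simp [h0, h1, h2, ih]
        · simp [h0, h1, h2, ih]

-- ===== VERDICT (by name: the statement is the Claim_ definition above) =====
theorem get_context_active_indices_spec : Claim_equal_get_context_active_indices := by
  intro con_act _
  unfold Spec_get_context_active_indices get_context_active_indices get_context_active_indices_alt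
  have h2 := pvTriFold (PySem.List.enumerate con_act 0) [] [] []
  simp only [List.nil_append] at h2
  rw [← h2, PySem.List.enumerate_eq_map_pyRange con_act 0, List.foldl_map]
  rfl
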